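-- pv_equiv track=rewrite | github.com/Himanshujchavan/Traveling-Ai | my-mcp-server/services/ai_trip_planner.py | _filter_days_by_weather
-- ===== SOURCE A (Python) =====
-- from typing import Dict, Any, List
--
-- def _filter_days_by_weather(days: List[str], forecast: List[Dict[str, Any]], avoid_bad_weather: bool) -> List[str]:
--     if not avoid_bad_weather or not forecast:
--         return days
--     bad_keywords = {"rain", "storm", "snow", "thunder"}
--     bad_dates = set()
--     for entry in forecast:
--         desc = (entry.get("description") or "").lower()
--         date = entry.get("date")
--         if date and any(k in desc for k in bad_keywords):
--             bad_dates.add(date)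
--     return [d for d in days if d not in bad_dates] or days  # never drop all days
-- ===== SOURCE B (Python) =====
-- from typing import Dict, Any, List
--
-- _BAD_KEYWORDS = ("rain", "storm", "snow", "thunder")
--
-- def _is_bad_for(entry, d):
--     return (entry.get("date") == d and entry.get("date")
--             and any(k in (entry.get("description") or "").lower() for k in _BAD_KEYWORDS))
--
-- def _filter_days_by_weather(days: List[str], forecast: List[Dict[str, Any]], avoid_bad_weather: bool) -> List[str]:
--     if not avoid_bad_weather or not forecast:
--         return days
--     kept = [d for d in days if not any(_is_bad_for(e, d) for e in forecast)]
--     return kept or days  # never drop all days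
-- ===== Notes on version B (the rewrite author's own statement) =====
-- stated objective: alternative
-- what changed: Replaces the precomputed bad_dates set with a direct per-day existential scan of the forecast (index-then-filter becomes repeated inline scanning), keeping the guard and the `or days` fallback.
import Mathlib
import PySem

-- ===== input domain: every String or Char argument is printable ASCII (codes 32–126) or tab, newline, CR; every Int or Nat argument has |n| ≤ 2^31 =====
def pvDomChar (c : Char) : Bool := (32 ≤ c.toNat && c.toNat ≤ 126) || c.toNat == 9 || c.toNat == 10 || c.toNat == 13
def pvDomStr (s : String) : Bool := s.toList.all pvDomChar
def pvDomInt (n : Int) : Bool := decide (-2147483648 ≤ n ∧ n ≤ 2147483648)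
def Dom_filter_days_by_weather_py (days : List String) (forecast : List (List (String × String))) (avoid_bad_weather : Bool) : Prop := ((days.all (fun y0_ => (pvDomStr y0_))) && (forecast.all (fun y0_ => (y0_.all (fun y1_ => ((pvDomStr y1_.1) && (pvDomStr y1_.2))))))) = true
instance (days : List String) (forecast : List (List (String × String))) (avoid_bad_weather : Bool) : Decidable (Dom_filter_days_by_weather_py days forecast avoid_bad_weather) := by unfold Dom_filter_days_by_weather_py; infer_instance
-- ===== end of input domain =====

-- B replaces A's precomputed bad-dates set by a direct per-day scan of the forecast (alternative decomposition, same results).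

-- entry.get(k) on a dict given as an association list (first match)
def pvGet (entry : List (String × String)) (k : String) : Option String :=
  PySem.Dict.get? (PySem.Dict.mk entry) k

def pvBadKeywords : List String := ["rain", "storm", "snow", "thunder"]

-- ===== PORT A =====
def filter_days_by_weather_py (days : List String) (forecast : List (List (String × String))) (avoid_bad_weather : Bool) : List String :=
  if !avoid_bad_weather || forecast.isEmpty then days
  else
    let bad_dates : PySem.Set String := forecast.foldl (fun bd entry =>
      let desc := PySem.Str.lower ((pvGet entry "description").getD "")
      match pvGet entry "date" with
      | some date =>
          if date ≠ "" ∧ pvBadKeywords.any (fun k => PySem.Str.isIn k desc) then PySem.Set.add bd date else bd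
      | none => bd) PySem.Set.empty
    let res := days.filter (fun d => !(PySem.Set.contains bad_dates d))
    if res.isEmpty then days else res

-- ===== PORT B =====
def pvIsBadFor (entry : List (String × String)) (d : String) : Bool :=
  pvGet entry "date" == some d && d != "" &&
    pvBadKeywords.any (fun k => PySem.Str.isIn k (PySem.Str.lower ((pvGet entry "description").getD "")))

def filter_days_by_weather_py_alt (days : List String) (forecast : List (List (String × String))) (avoid_bad_weather : Bool) : List String :=
  if !avoid_bad_weather || forecast.isEmpty then days
  else
    let kept := days.filter (fun d => ! forecast.any (fun e => pvIsBadFor e d))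
    if kept.isEmpty then days else kept

-- ===== PRECONDITION & SPEC =====
def Spec_filter_days_by_weather_py (days : List String) (forecast : List (List (String × String))) (avoid_bad_weather : Bool) (out : List String) : Prop := out = filter_days_by_weather_py_alt days forecast avoid_bad_weather
instance (days : List String) (forecast : List (List (String × String))) (avoid_bad_weather : Bool) (out : List String) : Decidable (Spec_filter_days_by_weather_py days forecast avoid_bad_weather out) := by unfold Spec_filter_days_by_weather_py; infer_instance

-- ===== CLAIM (what is proved, stated in full; the proofs are below) =====
def Claim_equal_filter_days_by_weather_py : Prop := ∀ (days : List String) (forecast : List (List (String × String))) (avoid_bad_weather : Bool), Dom_filter_days_by_weather_py days forecast avoid_bad_weather → Spec_filter_days_by_weather_py days forecast avoid_bad_weather (filter_days_by_weather_py days forecast avoid_bad_weather)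

-- ===== LEMMAS AND PROOFS =====

-- one step of A's fold, expressed as B's per-entry test
lemma pv_step (s : PySem.Set String) (date d : String) (kw : Bool) :
    PySem.Set.contains (if date ≠ "" ∧ kw = true then PySem.Set.add s date else s) d
    = (PySem.Set.contains s d || ((some date == some d) && d != "" && kw)) := by
  by_cases hdd : date = d
  · subst hdd
    by_cases he : date = ""
    · subst he; cases kw <;> simp
    · cases kw <;> simp [he, PySem.Set.mem_add]
  · have hne : (some date == some d) = false := by simp [hdd]
    by_cases he : date = "" <;> cases kw <;>
      simp [he, hne, PySem.Set.mem_add, Ne.symm hdd]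

-- membership in A's folded bad_dates set = B's existential scan of the forecast
lemma pv_contains_fold (forecast : List (List (String × String))) (s : PySem.Set String) (d : String) :
    PySem.Set.contains (forecast.foldl (fun bd entry =>
      let desc := PySem.Str.lower ((pvGet entry "description").getD "")
      match pvGet entry "date" with
      | some date =>
          if date ≠ "" ∧ pvBadKeywords.any (fun k => PySem.Str.isIn k desc) then PySem.Set.add bd date else bd
      | none => bd) s) d
    = (PySem.Set.contains s d || forecast.any (fun e => pvIsBadFor e d)) := by
  induction forecast generalizing s with
  | nil => simp
  | cons e rest ih =>
    simp only [List.foldl_cons, List.any_cons]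
    cases hdt : pvGet e "date" with
    | none => rw [ih]; simp [pvIsBadFor, hdt]
    | some date =>
      rw [ih, pv_step]
      simp [pvIsBadFor, hdt, Bool.or_assoc]

-- ===== VERDICT (by name: the statement is the Claim_ definition above) =====
theorem filter_days_by_weather_py_spec : Claim_equal_filter_days_by_weather_py := by
  intro days forecast avoid _
  unfold Spec_filter_days_by_weather_py filter_days_by_weather_py filter_days_by_weather_py_alt
  by_cases hg : (!avoid || forecast.isEmpty) = true
  · simp [hg]
  · simp only [hg, if_neg, Bool.false_eq_true, not_false_eq_true]
    have hfilter : days.filter (fun d => !(PySem.Set.contains (forecast.foldl (fun bd entry =>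
        let desc := PySem.Str.lower ((pvGet entry "description").getD "")
        match pvGet entry "date" with
        | some date =>
            if date ≠ "" ∧ pvBadKeywords.any (fun k => PySem.Str.isIn k desc) then PySem.Set.add bd date else bd
        | none => bd) PySem.Set.empty) d))
        = days.filter (fun d => ! forecast.any (fun e => pvIsBadFor e d)) := by
      apply List.filter_congr
      intro d _
      rw [pv_contains_fold]
      simp [PySem.Set.empty]
    simp only [hfilter]
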